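-- pv_equiv track=rewrite | github.com/tmckenzie2/Tom-Eddy_Project | naive_bayes_classifier.py | compute_rating
-- ===== SOURCE A (Python) =====
-- def compute_rating(col_list):
--     '''
--     Takes in a predicted value and an actual value and calculates the rating for those values based on the mpg info from PA2.
--     This function then returns the predicted class rating and the actual rating for mpg.
--     '''
--     rating_list = []
--     for actual_val in col_list:
--
--         if actual_val >= 2000 and actual_val <= 2499:
--             rating_list.append(1)
--         elif actual_val >= 2500 and actual_val <= 2999:
--             rating_list.append(2)
--         elif actual_val >= 3000 and actual_val <= 3499:
--             rating_list.append(3)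
--         elif actual_val >= 3500 and actual_val <= 3999:
--             rating_list.append(4)
--         elif actual_val >= 4000 and actual_val <= 4499:
--             rating_list.append(5)
--         elif actual_val >=4500 and actual_val <= 4999:
--             rating_list.append(6)
--         elif actual_val >= 5000 and actual_val <= 5499:
--             rating_list.append(7)
--         elif actual_val >= 5500 and actual_val <= 6999:
--             rating_list.append(8)
--         elif actual_val >= 7000 and actual_val <= 7499:
--             rating_list.append(9)
--         elif actual_val >=7500 and actual_val <= 7999:
--             rating_list.append(10)
--         elif actual_val >= 8000 and actual_val <= 8499:
--             rating_list.append(11)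
--         elif actual_val >= 8500 and actual_val <= 8999:
--             rating_list.append(12)
--         elif actual_val >= 9000 and actual_val <= 9499:
--             rating_list.append(13)
--         elif actual_val >= 9500 and actual_val <= 9999:
--             rating_list.append(14)
--         elif actual_val >= 10000 and actual_val <= 10499:
--             rating_list.append(15)
--         elif actual_val >=10500 and actual_val <= 10999:
--             rating_list.append(16)
--         elif actual_val >= 11000 and actual_val <= 11499:
--             rating_list.append(17)
--         elif actual_val >= 11500 and actual_val <= 11999:
--             rating_list.append(18)
--         elif actual_val >= 12000 and actual_val <= 12499:
--             rating_list.append(19)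
--         elif actual_val >= 12500 and actual_val <= 12999:
--             rating_list.append(20)
--         elif actual_val >= 13000 and actual_val <= 13499:
--             rating_list.append(21)
--         elif actual_val >=13500 and actual_val <= 13999:
--             rating_list.append(22)
--         elif actual_val >= 14000 and actual_val <= 14499:
--             rating_list.append(23)
--         elif actual_val >= 14500 and actual_val <= 14999:
--             rating_list.append(24)
--         elif actual_val >= 15000 and actual_val <= 15499:
--             rating_list.append(25)
--         elif actual_val >= 15500 and actual_val <= 15999:
--             rating_list.append(26)
--
--     return rating_list
-- ===== SOURCE B (Python) =====
-- def compute_rating(col_list):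
--     rating_list = []
--     for v in col_list:
--         if 2000 <= v <= 5499:
--             rating_list.append(int((v - 2000) // 500) + 1)
--         elif 5500 <= v <= 6999:
--             rating_list.append(8)
--         elif 7000 <= v <= 15999:
--             rating_list.append(int((v - 7000) // 500) + 9)
--     return rating_list
-- ===== Notes on version B (the rewrite author's own statement) =====
-- stated objective: simpler
-- what changed: Replaces the 26-branch if/elif range chain with a closed-form bucket index ((val-lo)//500 + offset) over three regimes (2000-5499, the wide 5500-6999 band, 7000-15999).
import Mathlib
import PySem

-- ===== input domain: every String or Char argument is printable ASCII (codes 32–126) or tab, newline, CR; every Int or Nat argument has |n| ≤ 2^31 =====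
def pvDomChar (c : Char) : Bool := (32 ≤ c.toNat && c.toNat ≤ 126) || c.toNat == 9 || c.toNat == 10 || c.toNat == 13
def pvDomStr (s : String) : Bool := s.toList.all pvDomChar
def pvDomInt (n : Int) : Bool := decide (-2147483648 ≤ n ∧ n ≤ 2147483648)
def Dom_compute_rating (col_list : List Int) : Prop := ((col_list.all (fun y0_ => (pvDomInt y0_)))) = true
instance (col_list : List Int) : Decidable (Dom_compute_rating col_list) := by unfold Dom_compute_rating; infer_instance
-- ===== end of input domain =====

-- B replaces A's 26-branch range chain with a closed-form bucket index over three regimes (simpler).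

-- ===== PORT A =====
-- one iteration of A's loop body: the 26-branch elif chain, appending to rating_list
def compute_rating_step (rating_list : List Int) (actual_val : Int) : List Int :=
  if actual_val ≥ 2000 ∧ actual_val ≤ 2499 then rating_list ++ [1]
  else if actual_val ≥ 2500 ∧ actual_val ≤ 2999 then rating_list ++ [2]
  else if actual_val ≥ 3000 ∧ actual_val ≤ 3499 then rating_list ++ [3]
  else if actual_val ≥ 3500 ∧ actual_val ≤ 3999 then rating_list ++ [4]
  else if actual_val ≥ 4000 ∧ actual_val ≤ 4499 then rating_list ++ [5]
  else if actual_val ≥ 4500 ∧ actual_val ≤ 4999 then rating_list ++ [6]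
  else if actual_val ≥ 5000 ∧ actual_val ≤ 5499 then rating_list ++ [7]
  else if actual_val ≥ 5500 ∧ actual_val ≤ 6999 then rating_list ++ [8]
  else if actual_val ≥ 7000 ∧ actual_val ≤ 7499 then rating_list ++ [9]
  else if actual_val ≥ 7500 ∧ actual_val ≤ 7999 then rating_list ++ [10]
  else if actual_val ≥ 8000 ∧ actual_val ≤ 8499 then rating_list ++ [11]
  else if actual_val ≥ 8500 ∧ actual_val ≤ 8999 then rating_list ++ [12]
  else if actual_val ≥ 9000 ∧ actual_val ≤ 9499 then rating_list ++ [13]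
  else if actual_val ≥ 9500 ∧ actual_val ≤ 9999 then rating_list ++ [14]
  else if actual_val ≥ 10000 ∧ actual_val ≤ 10499 then rating_list ++ [15]
  else if actual_val ≥ 10500 ∧ actual_val ≤ 10999 then rating_list ++ [16]
  else if actual_val ≥ 11000 ∧ actual_val ≤ 11499 then rating_list ++ [17]
  else if actual_val ≥ 11500 ∧ actual_val ≤ 11999 then rating_list ++ [18]
  else if actual_val ≥ 12000 ∧ actual_val ≤ 12499 then rating_list ++ [19]
  else if actual_val ≥ 12500 ∧ actual_val ≤ 12999 then rating_list ++ [20]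
  else if actual_val ≥ 13000 ∧ actual_val ≤ 13499 then rating_list ++ [21]
  else if actual_val ≥ 13500 ∧ actual_val ≤ 13999 then rating_list ++ [22]
  else if actual_val ≥ 14000 ∧ actual_val ≤ 14499 then rating_list ++ [23]
  else if actual_val ≥ 14500 ∧ actual_val ≤ 14999 then rating_list ++ [24]
  else if actual_val ≥ 15000 ∧ actual_val ≤ 15499 then rating_list ++ [25]
  else if actual_val ≥ 15500 ∧ actual_val ≤ 15999 then rating_list ++ [26]
  else rating_list

def compute_rating (col_list : List Int) : List Int :=
  col_list.foldl compute_rating_step []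

-- ===== PORT B =====
-- one iteration of B's loop body: three regimes, closed-form bucket index
def compute_rating_alt_step (rating_list : List Int) (v : Int) : List Int :=
  if 2000 ≤ v ∧ v ≤ 5499 then rating_list ++ [PySem.Int.floordiv (v - 2000) 500 + 1]
  else if 5500 ≤ v ∧ v ≤ 6999 then rating_list ++ [8]
  else if 7000 ≤ v ∧ v ≤ 15999 then rating_list ++ [PySem.Int.floordiv (v - 7000) 500 + 9]
  else rating_list

def compute_rating_alt (col_list : List Int) : List Int :=
  col_list.foldl compute_rating_alt_step []

-- ===== PRECONDITION & SPEC =====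
def Spec_compute_rating (col_list : List Int) (out : List Int) : Prop := out = compute_rating_alt col_list
instance (col_list : List Int) (out : List Int) : Decidable (Spec_compute_rating col_list out) := by unfold Spec_compute_rating; infer_instance

-- ===== CLAIM (what is proved, stated in full; the proofs are below) =====
def Claim_equal_compute_rating : Prop := ∀ (col_list : List Int), Dom_compute_rating col_list → Spec_compute_rating col_list (compute_rating col_list)

-- ===== LEMMAS AND PROOFS =====
theorem compute_rating_step_eq (acc : List Int) (v : Int) :
    compute_rating_step acc v = compute_rating_alt_step acc v := by
  unfold compute_rating_step compute_rating_alt_step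
  rw [PySem.Int.floordiv_eq_ediv_of_pos (a := v - 2000) (show (0:Int) < 500 by norm_num),
      PySem.Int.floordiv_eq_ediv_of_pos (a := v - 7000) (show (0:Int) < 500 by norm_num)]
  by_cases h1 : v ≥ 2000 ∧ v ≤ 2499
  · rw [if_pos h1]
    rw [if_pos (show 2000 ≤ v ∧ v ≤ 5499 by omega)]
    congr 2; omega
  · rw [if_neg h1]
    by_cases h2 : v ≥ 2500 ∧ v ≤ 2999
    · rw [if_pos h2]
      rw [if_pos (show 2000 ≤ v ∧ v ≤ 5499 by omega)]
      congr 2; omega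
    · rw [if_neg h2]
      by_cases h3 : v ≥ 3000 ∧ v ≤ 3499
      · rw [if_pos h3]
        rw [if_pos (show 2000 ≤ v ∧ v ≤ 5499 by omega)]
        congr 2; omega
      · rw [if_neg h3]
        by_cases h4 : v ≥ 3500 ∧ v ≤ 3999
        · rw [if_pos h4]
          rw [if_pos (show 2000 ≤ v ∧ v ≤ 5499 by omega)]
          congr 2; omega
        · rw [if_neg h4]
          by_cases h5 : v ≥ 4000 ∧ v ≤ 4499
          · rw [if_pos h5]
            rw [if_pos (show 2000 ≤ v ∧ v ≤ 5499 by omega)]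
            congr 2; omega
          · rw [if_neg h5]
            by_cases h6 : v ≥ 4500 ∧ v ≤ 4999
            · rw [if_pos h6]
              rw [if_pos (show 2000 ≤ v ∧ v ≤ 5499 by omega)]
              congr 2; omega
            · rw [if_neg h6]
              by_cases h7 : v ≥ 5000 ∧ v ≤ 5499
              · rw [if_pos h7]
                rw [if_pos (show 2000 ≤ v ∧ v ≤ 5499 by omega)]
                congr 2; omega
              · rw [if_neg h7]
                by_cases h8 : v ≥ 5500 ∧ v ≤ 6999
                · rw [if_pos h8]
                  rw [if_neg (show ¬(2000 ≤ v ∧ v ≤ 5499) by omega),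
                      if_pos (show 5500 ≤ v ∧ v ≤ 6999 by omega)]
                · rw [if_neg h8]
                  by_cases h9 : v ≥ 7000 ∧ v ≤ 7499
                  · rw [if_pos h9]
                    rw [if_neg (show ¬(2000 ≤ v ∧ v ≤ 5499) by omega),
                        if_neg (show ¬(5500 ≤ v ∧ v ≤ 6999) by omega),
                        if_pos (show 7000 ≤ v ∧ v ≤ 15999 by omega)]
                    congr 2; omega
                  · rw [if_neg h9]
                    by_cases h10 : v ≥ 7500 ∧ v ≤ 7999
                    · rw [if_pos h10]
                      rw [if_neg (show ¬(2000 ≤ v ∧ v ≤ 5499) by omega),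
                          if_neg (show ¬(5500 ≤ v ∧ v ≤ 6999) by omega),
                          if_pos (show 7000 ≤ v ∧ v ≤ 15999 by omega)]
                      congr 2; omega
                    · rw [if_neg h10]
                      by_cases h11 : v ≥ 8000 ∧ v ≤ 8499
                      · rw [if_pos h11]
                        rw [if_neg (show ¬(2000 ≤ v ∧ v ≤ 5499) by omega),
                            if_neg (show ¬(5500 ≤ v ∧ v ≤ 6999) by omega),
                            if_pos (show 7000 ≤ v ∧ v ≤ 15999 by omega)]
                        congr 2; omega
                      · rw [if_neg h11]
                        by_cases h12 : v ≥ 8500 ∧ v ≤ 8999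
                        · rw [if_pos h12]
                          rw [if_neg (show ¬(2000 ≤ v ∧ v ≤ 5499) by omega),
                              if_neg (show ¬(5500 ≤ v ∧ v ≤ 6999) by omega),
                              if_pos (show 7000 ≤ v ∧ v ≤ 15999 by omega)]
                          congr 2; omega
                        · rw [if_neg h12]
                          by_cases h13 : v ≥ 9000 ∧ v ≤ 9499
                          · rw [if_pos h13]
                            rw [if_neg (show ¬(2000 ≤ v ∧ v ≤ 5499) by omega),
                                if_neg (show ¬(5500 ≤ v ∧ v ≤ 6999) by omega),
                                if_pos (show 7000 ≤ v ∧ v ≤ 15999 by omega)]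
                            congr 2; omega
                          · rw [if_neg h13]
                            by_cases h14 : v ≥ 9500 ∧ v ≤ 9999
                            · rw [if_pos h14]
                              rw [if_neg (show ¬(2000 ≤ v ∧ v ≤ 5499) by omega),
                                  if_neg (show ¬(5500 ≤ v ∧ v ≤ 6999) by omega),
                                  if_pos (show 7000 ≤ v ∧ v ≤ 15999 by omega)]
                              congr 2; omega
                            · rw [if_neg h14]
                              by_cases h15 : v ≥ 10000 ∧ v ≤ 10499
                              · rw [if_pos h15]
                                rw [if_neg (show ¬(2000 ≤ v ∧ v ≤ 5499) by omega),
                                    if_neg (show ¬(5500 ≤ v ∧ v ≤ 6999) by omega),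
                                    if_pos (show 7000 ≤ v ∧ v ≤ 15999 by omega)]
                                congr 2; omega
                              · rw [if_neg h15]
                                by_cases h16 : v ≥ 10500 ∧ v ≤ 10999
                                · rw [if_pos h16]
                                  rw [if_neg (show ¬(2000 ≤ v ∧ v ≤ 5499) by omega),
                                      if_neg (show ¬(5500 ≤ v ∧ v ≤ 6999) by omega),
                                      if_pos (show 7000 ≤ v ∧ v ≤ 15999 by omega)]
                                  congr 2; omega
                                · rw [if_neg h16]
                                  by_cases h17 : v ≥ 11000 ∧ v ≤ 11499
                                  · rw [if_pos h17]
                                    rw [if_neg (show ¬(2000 ≤ v ∧ v ≤ 5499) by omega),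
                                        if_neg (show ¬(5500 ≤ v ∧ v ≤ 6999) by omega),
                                        if_pos (show 7000 ≤ v ∧ v ≤ 15999 by omega)]
                                    congr 2; omega
                                  · rw [if_neg h17]
                                    by_cases h18 : v ≥ 11500 ∧ v ≤ 11999
                                    · rw [if_pos h18]
                                      rw [if_neg (show ¬(2000 ≤ v ∧ v ≤ 5499) by omega),
                                          if_neg (show ¬(5500 ≤ v ∧ v ≤ 6999) by omega),
                                          if_pos (show 7000 ≤ v ∧ v ≤ 15999 by omega)]
                                      congr 2; omega
                                    · rw [if_neg h18]
                                      by_cases h19 : v ≥ 12000 ∧ v ≤ 12499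
                                      · rw [if_pos h19]
                                        rw [if_neg (show ¬(2000 ≤ v ∧ v ≤ 5499) by omega),
                                            if_neg (show ¬(5500 ≤ v ∧ v ≤ 6999) by omega),
                                            if_pos (show 7000 ≤ v ∧ v ≤ 15999 by omega)]
                                        congr 2; omega
                                      · rw [if_neg h19]
                                        by_cases h20 : v ≥ 12500 ∧ v ≤ 12999
                                        · rw [if_pos h20]
                                          rw [if_neg (show ¬(2000 ≤ v ∧ v ≤ 5499) by omega),
                                              if_neg (show ¬(5500 ≤ v ∧ v ≤ 6999) by omega),
                                              if_pos (show 7000 ≤ v ∧ v ≤ 15999 by omega)]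
                                          congr 2; omega
                                        · rw [if_neg h20]
                                          by_cases h21 : v ≥ 13000 ∧ v ≤ 13499
                                          · rw [if_pos h21]
                                            rw [if_neg (show ¬(2000 ≤ v ∧ v ≤ 5499) by omega),
                                                if_neg (show ¬(5500 ≤ v ∧ v ≤ 6999) by omega),
                                                if_pos (show 7000 ≤ v ∧ v ≤ 15999 by omega)]
                                            congr 2; omega
                                          · rw [if_neg h21]
                                            by_cases h22 : v ≥ 13500 ∧ v ≤ 13999
                                            · rw [if_pos h22]
                                              rw [if_neg (show ¬(2000 ≤ v ∧ v ≤ 5499) by omega),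
                                                  if_neg (show ¬(5500 ≤ v ∧ v ≤ 6999) by omega),
                                                  if_pos (show 7000 ≤ v ∧ v ≤ 15999 by omega)]
                                              congr 2; omega
                                            · rw [if_neg h22]
                                              by_cases h23 : v ≥ 14000 ∧ v ≤ 14499
                                              · rw [if_pos h23]
                                                rw [if_neg (show ¬(2000 ≤ v ∧ v ≤ 5499) by omega),
                                                    if_neg (show ¬(5500 ≤ v ∧ v ≤ 6999) by omega),
                                                    if_pos (show 7000 ≤ v ∧ v ≤ 15999 by omega)]
                                                congr 2; omega
                                              · rw [if_neg h23]
                                                by_cases h24 : v ≥ 14500 ∧ v ≤ 14999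
                                                · rw [if_pos h24]
                                                  rw [if_neg (show ¬(2000 ≤ v ∧ v ≤ 5499) by omega),
                                                      if_neg (show ¬(5500 ≤ v ∧ v ≤ 6999) by omega),
                                                      if_pos (show 7000 ≤ v ∧ v ≤ 15999 by omega)]
                                                  congr 2; omega
                                                · rw [if_neg h24]
                                                  by_cases h25 : v ≥ 15000 ∧ v ≤ 15499
                                                  · rw [if_pos h25]
                                                    rw [if_neg (show ¬(2000 ≤ v ∧ v ≤ 5499) by omega),
                                                        if_neg (show ¬(5500 ≤ v ∧ v ≤ 6999) by omega),
                                                        if_pos (show 7000 ≤ v ∧ v ≤ 15999 by omega)]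
                                                    congr 2; omega
                                                  · rw [if_neg h25]
                                                    by_cases h26 : v ≥ 15500 ∧ v ≤ 15999
                                                    · rw [if_pos h26]
                                                      rw [if_neg (show ¬(2000 ≤ v ∧ v ≤ 5499) by omega),
                                                          if_neg (show ¬(5500 ≤ v ∧ v ≤ 6999) by omega),
                                                          if_pos (show 7000 ≤ v ∧ v ≤ 15999 by omega)]
                                                      congr 2; omega
                                                    · rw [if_neg h26]
                                                      rw [if_neg (show ¬(2000 ≤ v ∧ v ≤ 5499) by omega),
                                                          if_neg (show ¬(5500 ≤ v ∧ v ≤ 6999) by omega),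
                                                          if_neg (show ¬(7000 ≤ v ∧ v ≤ 15999) by omega)]

theorem compute_rating_foldl_eq (l : List Int) (acc : List Int) :
    l.foldl compute_rating_step acc = l.foldl compute_rating_alt_step acc :=
  List.foldl_ext (f := compute_rating_step) (g := compute_rating_alt_step) acc
    (fun a x _ => compute_rating_step_eq a x)

-- ===== VERDICT (by name: the statement is the Claim_ definition above) =====
theorem compute_rating_spec : Claim_equal_compute_rating := by
  intro col_list _
  unfold Spec_compute_rating compute_rating compute_rating_alt
  exact compute_rating_foldl_eq col_list []
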